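-- pv_equiv track=rewrite | github.com/JoshFruin/COMP5012 | Code/plot_pareto_front.py | is_pareto_front
-- ===== SOURCE A (Python) =====
-- def is_pareto_front(distances, times):
--     """
--     Check if the given set of distances and times represents a Pareto front.
--
--     Args:
--     - distances (list): List of distance values.
--     - times (list): List of time values.
--
--     Returns:
--     - bool: True if the given set represents a Pareto front, False otherwise.
--     """
--     pareto_front = True
--     for i in range(len(distances)):
--         for j in range(len(distances)):
--             if i != j:
--                 # Check if point i dominates point j
--                 if distances[i] <= distances[j] and times[i] <= times[j] and (
--                         distances[i] < distances[j] or times[i] < times[j]):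
--                     pareto_front = False
--                     break
--         if not pareto_front:
--             break
--     return pareto_front
-- ===== SOURCE B (Python) =====
-- def is_pareto_front(distances, times):
--     # Sort the points lexicographically; the set is a Pareto front iff every
--     # adjacent pair in sorted order is either identical or has strictly larger
--     # distance AND strictly smaller time.
--     pts = sorted(zip(distances, times))
--     for p, q in zip(pts, pts[1:]):
--         if p != q and not (p[0] < q[0] and p[1] > q[1]):
--             return False
--     return True
-- ===== Notes on version B (the rewrite author's own statement) =====
-- stated objective: faster
-- what changed: Replaced the all-pairs O(n^2) domination scan by sorting the (distance,time) points lexicographically and checking each adjacent pair once (identical, or strictly larger distance with strictly smaller time).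
-- outside the precondition, e.g. on is_pareto_front([0, 1, 5], [0, 2]): A returns False, B returns False
import Mathlib
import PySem

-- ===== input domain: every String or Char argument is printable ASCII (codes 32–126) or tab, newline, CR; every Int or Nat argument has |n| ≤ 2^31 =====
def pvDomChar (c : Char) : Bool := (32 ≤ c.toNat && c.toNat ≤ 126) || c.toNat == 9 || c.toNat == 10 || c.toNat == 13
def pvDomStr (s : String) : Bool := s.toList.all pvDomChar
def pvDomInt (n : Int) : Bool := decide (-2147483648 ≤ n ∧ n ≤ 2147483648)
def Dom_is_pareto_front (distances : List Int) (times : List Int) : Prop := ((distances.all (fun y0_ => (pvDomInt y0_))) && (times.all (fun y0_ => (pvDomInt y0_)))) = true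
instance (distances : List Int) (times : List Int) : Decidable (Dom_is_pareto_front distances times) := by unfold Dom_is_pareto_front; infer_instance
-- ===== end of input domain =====

-- B replaces A's all-pairs O(n^2) domination scan by a lexicographic sort plus one adjacent-pair pass.


-- ===== PORT A =====
-- inner 'for j in range(len(distances))' with its break: returns the pareto_front flag
-- (indexing via pyGetD, exact under Pre_: every index used is in range for both lists)
def aInnerLoop (distances times : List Int) (i : Int) : List Int → Bool
  | [] => true
  | j :: js =>
    if i ≠ j ∧ (PySem.List.pyGetD distances i 0 ≤ PySem.List.pyGetD distances j 0 ∧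
        PySem.List.pyGetD times i 0 ≤ PySem.List.pyGetD times j 0 ∧
        (PySem.List.pyGetD distances i 0 < PySem.List.pyGetD distances j 0 ∨
         PySem.List.pyGetD times i 0 < PySem.List.pyGetD times j 0)) then
      false
    else aInnerLoop distances times i js

-- outer 'for i in range(len(distances))' with its 'if not pareto_front: break'
def aOuterLoop (distances times : List Int) : List Int → Bool
  | [] => true
  | i :: is_ =>
    if aInnerLoop distances times i (PySem.List.pyRange 0 distances.length 1) = false then false
    else aOuterLoop distances times is_

def is_pareto_front (distances : List Int) (times : List Int) : Bool :=
  aOuterLoop distances times (PySem.List.pyRange 0 distances.length 1)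

-- ===== PORT B =====
-- 'for p, q in zip(pts, pts[1:]): if p != q and not (p[0] < q[0] and p[1] > q[1]): return False'
def bScan : List ((Int × Int) × (Int × Int)) → Bool
  | [] => true
  | (p, q) :: rest =>
    if p ≠ q ∧ ¬(p.1 < q.1 ∧ p.2 > q.2) then false else bScan rest

def is_pareto_front_alt (distances : List Int) (times : List Int) : Bool :=
  let pts := PySem.List.sorted2 (distances.zip times) Prod.fst Prod.snd
  bScan (pts.zip pts.tail)

-- ===== PRECONDITION & SPEC =====
-- Pre_ excludes times shorter than distances: there A raises IndexError, except on the
-- few such inputs where an early dominance break returns False before the bad index is read.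
def Pre_is_pareto_front (distances : List Int) (times : List Int) : Prop :=
  distances.length ≤ times.length
instance (distances : List Int) (times : List Int) : Decidable (Pre_is_pareto_front distances times) := by unfold Pre_is_pareto_front; infer_instance
def pvWitness_is_pareto_front : List Int × List Int := ([0, 3], [5, 1])

def Spec_is_pareto_front (distances : List Int) (times : List Int) (out : Bool) : Prop := out = is_pareto_front_alt distances times
instance (distances : List Int) (times : List Int) (out : Bool) : Decidable (Spec_is_pareto_front distances times out) := by unfold Spec_is_pareto_front; infer_instance

-- ===== CLAIM (what is proved, stated in full; the proofs are below) =====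
def Claim_equal_is_pareto_front : Prop := ∀ (distances : List Int) (times : List Int), Dom_is_pareto_front distances times → Pre_is_pareto_front distances times → Spec_is_pareto_front distances times (is_pareto_front distances times)

-- ===== LEMMAS AND PROOFS =====

-- point p dominates point q
def domR (p q : Int × Int) : Prop := p.1 ≤ q.1 ∧ p.2 ≤ q.2 ∧ (p.1 < q.1 ∨ p.2 < q.2)

-- the adjacent-pair condition B checks
def okR (p q : Int × Int) : Prop := p = q ∨ (p.1 < q.1 ∧ q.2 < p.2)

-- the lexicographic order sorted2 establishes
def lexLE (p q : Int × Int) : Prop := p.1 < q.1 ∨ (p.1 = q.1 ∧ p.2 ≤ q.2)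

-- the comparison sorted2 (reverse = false) inserts with
def beforeB (p q : Int × Int) : Bool :=
  decide (p.1 < q.1) || (!decide (q.1 < p.1) && decide (p.2 < q.2))

lemma beforeB_false_iff (p q : Int × Int) : beforeB q p = false ↔ lexLE p q := by
  simp [beforeB, lexLE]; omega

lemma insertBy_pairwise (x : Int × Int) (ys : List (Int × Int))
    (h : ys.Pairwise (fun a b => beforeB b a = false)) :
    (PySem.List.insertBy beforeB x ys).Pairwise (fun a b => beforeB b a = false) := by
  induction ys with
  | nil => simp [PySem.List.insertBy]
  | cons y ys ih =>
    rcases List.pairwise_cons.mp h with ⟨hy, hys⟩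
    by_cases hb : beforeB x y = true
    · simp only [PySem.List.insertBy, hb, if_pos]
      refine List.pairwise_cons.mpr ⟨?_, h⟩
      intro z hz
      rcases List.mem_cons.mp hz with rfl | hz
      · -- z = y : beforeB y x = false since beforeB x y = true
        revert hb; simp [beforeB]; omega
      · -- z ∈ ys : beforeB z y = false and beforeB x y = true
        have h1 := hy z hz
        revert hb h1; simp [beforeB]; omega
    · simp only [PySem.List.insertBy, hb, if_neg, Bool.false_eq_true, not_false_iff]
      refine List.pairwise_cons.mpr ⟨?_, ih hys⟩
      intro z hz
      rcases (PySem.List.mem_insertBy beforeB x z ys).mp hz with rfl | hz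
      · exact Bool.eq_false_iff.mpr hb
      · exact hy z hz

lemma foldl_insertBy_pairwise (xs acc : List (Int × Int))
    (h : acc.Pairwise (fun a b => beforeB b a = false)) :
    (xs.foldl (fun acc x => PySem.List.insertBy beforeB x acc) acc).Pairwise
      (fun a b => beforeB b a = false) := by
  induction xs generalizing acc with
  | nil => exact h
  | cons x xs ih => exact ih _ (insertBy_pairwise x acc h)

lemma sorted2_pairwise_lex (xs : List (Int × Int)) :
    (PySem.List.sorted2 xs Prod.fst Prod.snd).Pairwise lexLE := by
  have h : (PySem.List.sorted2 xs Prod.fst Prod.snd).Pairwise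
      (fun a b => beforeB b a = false) :=
    foldl_insertBy_pairwise xs [] List.Pairwise.nil
  exact h.imp (fun hab => (beforeB_false_iff _ _).mp hab)

-- B's scan over zip(pts, pts[1:]) is the IsChain of okR
lemma bScan_iff_chain : ∀ l : List (Int × Int), bScan (l.zip l.tail) = true ↔ l.IsChain okR
  | [] => by simp [bScan]
  | [p] => by simp [bScan]
  | p :: q :: rest => by
    have ih := bScan_iff_chain (q :: rest)
    rw [List.tail_cons] at ih
    simp only [List.tail_cons, List.zip_cons_cons, bScan]
    rw [List.isChain_cons]
    have hhead : (∀ y ∈ (q :: rest).head?, okR p y) ↔ okR p q := by simp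
    rw [hhead]
    by_cases h : p ≠ q ∧ ¬(p.1 < q.1 ∧ p.2 > q.2)
    · rw [if_pos h]
      constructor
      · intro hf; simp at hf
      · rintro ⟨hok, -⟩
        rcases h with ⟨hne, hno⟩
        rcases hok with rfl | hlt
        · exact absurd rfl hne
        · exact absurd ⟨hlt.1, hlt.2⟩ hno
    · rw [if_neg h, ih]
      have hok : okR p q := by
        rcases not_and_or.mp h with hpq | hno
        · exact Or.inl (not_not.mp hpq)
        · exact Or.inr ⟨(not_not.mp hno).1, (not_not.mp hno).2⟩
      exact ⟨fun hc => ⟨hok, hc⟩, fun hc => hc.2⟩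

-- on a lexicographically sorted list, mutual non-domination = Pairwise okR
lemma nondom_iff_pairwise_ok (s : List (Int × Int)) (hs : s.Pairwise lexLE) :
    (∀ p ∈ s, ∀ q ∈ s, ¬ domR p q) ↔ s.Pairwise okR := by
  constructor
  · intro hP
    rw [List.pairwise_iff_getElem] at hs ⊢
    intro a b ha hb hab
    have hlex := hs a b ha hb hab
    have h1 : ¬ domR s[a] s[b] := hP _ (List.getElem_mem _) _ (List.getElem_mem _)
    have h2 : ¬ domR s[b] s[a] := hP _ (List.getElem_mem _) _ (List.getElem_mem _)
    rcases hlex with hlt | ⟨heq, hle⟩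
    · refine Or.inr ⟨hlt, ?_⟩
      by_contra hno
      exact h1 ⟨le_of_lt hlt, by omega, Or.inl hlt⟩
    · by_cases hsnd : s[a].2 = s[b].2
      · exact Or.inl (Prod.ext heq hsnd)
      · exact absurd ⟨le_of_eq heq, hle, Or.inr (lt_of_le_of_ne hle hsnd)⟩ h1
  · intro hok p hp q hq
    rcases List.getElem_of_mem hp with ⟨a, ha, rfl⟩
    rcases List.getElem_of_mem hq with ⟨b, hb, rfl⟩
    rw [List.pairwise_iff_getElem] at hok
    rcases lt_trichotomy a b with hab | rfl | hab
    · rcases hok a b ha hb hab with heq | ⟨h1, h2⟩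
      · rw [heq]; rintro ⟨-, -, h | h⟩ <;> omega
      · rintro ⟨-, hle, -⟩; omega
    · rintro ⟨-, -, h | h⟩ <;> omega
    · rcases hok b a hb ha hab with heq | ⟨h1, h2⟩
      · rw [heq]; rintro ⟨-, -, h | h⟩ <;> omega
      · rintro ⟨hle, -, -⟩; omega

-- A's inner loop returns true iff no j in the remaining list is dominated by i
lemma aInnerLoop_true_iff (d t : List Int) (i : Int) (js : List Int) :
    aInnerLoop d t i js = true ↔ ∀ j ∈ js, ¬(i ≠ j ∧
      (PySem.List.pyGetD d i 0 ≤ PySem.List.pyGetD d j 0 ∧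
       PySem.List.pyGetD t i 0 ≤ PySem.List.pyGetD t j 0 ∧
       (PySem.List.pyGetD d i 0 < PySem.List.pyGetD d j 0 ∨
        PySem.List.pyGetD t i 0 < PySem.List.pyGetD t j 0))) := by
  induction js with
  | nil => simp [aInnerLoop]
  | cons j js ih =>
    simp only [aInnerLoop, List.mem_cons]
    by_cases h : i ≠ j ∧ (PySem.List.pyGetD d i 0 ≤ PySem.List.pyGetD d j 0 ∧
        PySem.List.pyGetD t i 0 ≤ PySem.List.pyGetD t j 0 ∧
        (PySem.List.pyGetD d i 0 < PySem.List.pyGetD d j 0 ∨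
         PySem.List.pyGetD t i 0 < PySem.List.pyGetD t j 0))
    · rw [if_pos h]
      constructor
      · intro hf; simp at hf
      · intro hall; exact absurd h (hall j (by simp))
    · rw [if_neg h, ih]
      constructor
      · rintro hall x (rfl | hx)
        · exact h
        · exact hall x hx
      · intro hall x hx; exact hall x (Or.inr hx)

lemma aOuterLoop_true_iff (d t : List Int) (is_ : List Int) :
    aOuterLoop d t is_ = true ↔
      ∀ i ∈ is_, aInnerLoop d t i (PySem.List.pyRange 0 d.length 1) = true := by
  induction is_ with
  | nil => simp [aOuterLoop]
  | cons i is_ ih =>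
    simp only [aOuterLoop, List.mem_cons]
    by_cases h : aInnerLoop d t i (PySem.List.pyRange 0 d.length 1) = false
    · rw [if_pos h]
      constructor
      · intro hf; simp at hf
      · intro hall; exact absurd (hall i (by simp)) (by simp [h])
    · rw [if_neg h, ih]
      constructor
      · rintro hall x (rfl | hx)
        · simpa using h
        · exact hall x hx
      · intro hall x hx; exact hall x (Or.inr hx)

-- A = true iff no point of the zipped list dominates another
lemma portA_iff (d t : List Int) (hlen : d.length ≤ t.length) :
    is_pareto_front d t = true ↔
      ∀ p ∈ d.zip t, ∀ q ∈ d.zip t, ¬ domR p q := by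
  have hz : (d.zip t).length = d.length := by
    simp [List.length_zip]; omega
  have hget : ∀ (k : Nat), (hk : k < d.length) →
      (d.zip t)[k]'(by omega) = (d[k], t[k]'(by omega)) := by
    intro k hk; simp [List.getElem_zip]
  constructor
  · intro hA p hp q hq
    rcases List.getElem_of_mem hp with ⟨a, ha, rfl⟩
    rcases List.getElem_of_mem hq with ⟨b, hb, rfl⟩
    rw [hz] at ha hb
    by_cases hab : a = b
    · subst hab
      rw [hget a ha]
      rintro ⟨-, -, h | h⟩ <;> omega
    · rw [is_pareto_front, aOuterLoop_true_iff] at hA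
      have hi : (a : Int) ∈ PySem.List.pyRange 0 d.length 1 := by
        rw [PySem.List.mem_pyRange_one]; omega
      have hj : (b : Int) ∈ PySem.List.pyRange 0 d.length 1 := by
        rw [PySem.List.mem_pyRange_one]; omega
      have hcond := (aInnerLoop_true_iff d t a _).mp (hA _ hi) _ hj
      have eda : PySem.List.pyGetD d ((a : Nat) : Int) 0 = d[a] :=
        PySem.List.pyGetD_eq_getElem d 0 (by omega) (by omega)
      have edb : PySem.List.pyGetD d ((b : Nat) : Int) 0 = d[b] :=
        PySem.List.pyGetD_eq_getElem d 0 (by omega) (by omega)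
      have eta : PySem.List.pyGetD t ((a : Nat) : Int) 0 = t[a]'(by omega) :=
        PySem.List.pyGetD_eq_getElem t 0 (by omega) (by omega)
      have etb : PySem.List.pyGetD t ((b : Nat) : Int) 0 = t[b]'(by omega) :=
        PySem.List.pyGetD_eq_getElem t 0 (by omega) (by omega)
      rw [eda, edb, eta, etb] at hcond
      rw [hget a ha, hget b hb]
      rintro ⟨h1, h2, h3⟩
      exact hcond ⟨by exact_mod_cast hab, h1, h2, h3⟩
  · intro hP
    rw [is_pareto_front, aOuterLoop_true_iff]
    intro i hi
    rw [aInnerLoop_true_iff]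
    intro j hj
    rw [PySem.List.mem_pyRange_one] at hi hj
    rintro ⟨hij, h1, h2, h3⟩
    have hia : i.toNat < d.length := by omega
    have hjb : j.toNat < d.length := by omega
    have hpi : (d.zip t)[i.toNat]'(by omega) ∈ d.zip t := List.getElem_mem _
    have hpj : (d.zip t)[j.toNat]'(by omega) ∈ d.zip t := List.getElem_mem _
    apply hP _ hpi _ hpj
    rw [hget i.toNat hia, hget j.toNat hjb]
    have edi : PySem.List.pyGetD d i 0 = d[i.toNat] :=
      PySem.List.pyGetD_eq_getElem d 0 hi.1 (by omega)
    have edj : PySem.List.pyGetD d j 0 = d[j.toNat] :=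
      PySem.List.pyGetD_eq_getElem d 0 hj.1 (by omega)
    have eti : PySem.List.pyGetD t i 0 = t[i.toNat]'(by omega) :=
      PySem.List.pyGetD_eq_getElem t 0 hi.1 (by omega)
    have etj : PySem.List.pyGetD t j 0 = t[j.toNat]'(by omega) :=
      PySem.List.pyGetD_eq_getElem t 0 hj.1 (by omega)
    simp only [edi, edj, eti, etj] at h1 h2 h3
    exact ⟨h1, h2, h3⟩

-- ===== VERDICT (by name: the statement is the Claim_ definition above) =====
theorem is_pareto_front_spec : Claim_equal_is_pareto_front := by
  intro d t _hDom hPre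
  unfold Spec_is_pareto_front
  have hlen : d.length ≤ t.length := hPre
  set pts := d.zip t with hpts
  set s := PySem.List.sorted2 pts Prod.fst Prod.snd with hsdef
  have hperm : s.Perm pts := PySem.List.sorted2_perm pts Prod.fst Prod.snd false
  have hsort : s.Pairwise lexLE := sorted2_pairwise_lex pts
  haveI : Trans okR okR okR := ⟨by
    rintro a b c (rfl | ⟨h1, h2⟩) hbc
    · exact hbc
    · rcases hbc with rfl | ⟨h3, h4⟩
      · exact Or.inr ⟨h1, h2⟩
      · exact Or.inr ⟨lt_trans h1 h3, lt_trans h4 h2⟩⟩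
  have hB : is_pareto_front_alt d t = true ↔ s.Pairwise okR := by
    rw [show is_pareto_front_alt d t = bScan (s.zip s.tail) from rfl,
        bScan_iff_chain s, List.isChain_iff_pairwise]
  have hA : is_pareto_front d t = true ↔ s.Pairwise okR := by
    rw [portA_iff d t hlen,
      ← nondom_iff_pairwise_ok s hsort]
    constructor
    · intro h p hp q hq
      exact h p (hperm.mem_iff.mp hp) q (hperm.mem_iff.mp hq)
    · intro h p hp q hq
      exact h p (hperm.mem_iff.mpr hp) q (hperm.mem_iff.mpr hq)
  rcases hb : is_pareto_front_alt d t with _ | _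
  · rcases ha : is_pareto_front d t with _ | _
    · rfl
    · exact absurd (hB.mpr (hA.mp ha)) (by simp [hb])
  · exact hA.mpr (hB.mp hb)
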